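-- pv_equiv track=rewrite | github.com/fwang12345/nonogram-solver | solver.py | pattern_id
-- ===== SOURCE A (Python) =====
-- def pattern_id(size, rows, cols):
--     rows_id = []
--     cols_id = []
--     count = size * size + 1
--     for row in rows:
--         row_id = []
--         for pat in row:
--             row_id.append(count)
--             count += size
--         rows_id.append(row_id)
--     for col in cols:
--         col_id = []
--         for pat in col:
--             col_id.append(count)
--             count += size
--         cols_id.append(col_id)
--     return rows_id, cols_id
-- ===== SOURCE B (Python) =====
-- def pattern_id(size, rows, cols):
--     # Offset-table approach: compute each group's starting flat pattern index
--     # by a prefix sum of group lengths, then emit each group in closed form.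
--     lens = [len(r) for r in rows] + [len(c) for c in cols]
--     starts = []
--     s = 0
--     for L in lens:
--         starts.append(s)
--         s += L
--     base = size * size + 1
--     groups = [[base + (st + j) * size for j in range(L)]
--               for st, L in zip(starts, lens)]
--     return groups[:len(rows)], groups[len(rows):]
-- ===== Notes on version B (the rewrite author's own statement) =====
-- stated objective: alternative
-- what changed: Replaced the single mutable counter threaded through nested loops with a prefix-sum offset table over group lengths followed by a closed-form comprehension per group.
import Mathlib
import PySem

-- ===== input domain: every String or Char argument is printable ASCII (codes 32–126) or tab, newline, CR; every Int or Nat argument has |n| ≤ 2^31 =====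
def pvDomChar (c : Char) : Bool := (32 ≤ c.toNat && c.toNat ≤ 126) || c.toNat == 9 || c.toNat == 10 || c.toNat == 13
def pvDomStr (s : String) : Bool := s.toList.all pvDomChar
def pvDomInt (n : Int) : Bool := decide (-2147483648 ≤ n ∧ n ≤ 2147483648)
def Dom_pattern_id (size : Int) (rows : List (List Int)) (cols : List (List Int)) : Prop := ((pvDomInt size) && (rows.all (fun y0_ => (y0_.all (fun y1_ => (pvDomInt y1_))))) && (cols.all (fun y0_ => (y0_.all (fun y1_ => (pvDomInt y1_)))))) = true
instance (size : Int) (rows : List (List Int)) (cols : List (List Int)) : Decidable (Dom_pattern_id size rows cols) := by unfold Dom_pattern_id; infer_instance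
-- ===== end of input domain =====

-- B replaces A's mutable counter threaded through nested loops by a prefix-sum
-- offset table over group lengths plus a closed-form pass per group (objective: alternative).

-- ===== PORT A =====
-- inner loop: for pat in row: row_id.append(count); count += size
def pvAGroup (size : Int) (row : List Int) (c : Int) : List Int × Int :=
  row.foldl (fun (q : List Int × Int) _pat => (q.1 ++ [q.2], q.2 + size)) ([], c)

-- outer loop over a list of groups, threading count
def pvAGroups (size : Int) (gs : List (List Int)) (acc : List (List Int)) (c : Int) :
    List (List Int) × Int :=
  gs.foldl (fun (p : List (List Int) × Int) g =>
    let r := pvAGroup size g p.2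
    (p.1 ++ [r.1], r.2)) (acc, c)

def pattern_id (size : Int) (rows : List (List Int)) (cols : List (List Int)) : List (List Int) × List (List Int) :=
  let count := size * size + 1
  let r := pvAGroups size rows [] count
  let c := pvAGroups size cols [] r.2
  (r.1, c.1)

-- ===== PORT B =====
def pattern_id_alt (size : Int) (rows : List (List Int)) (cols : List (List Int)) : List (List Int) × List (List Int) :=
  let lens : List Int := rows.map (fun r => (r.length : Int)) ++ cols.map (fun c => (c.length : Int))
  -- starts = []; s = 0; for L in lens: starts.append(s); s += L
  let starts : List Int := (lens.foldl (fun (p : List Int × Int) L => (p.1 ++ [p.2], p.2 + L)) ([], 0)).1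
  let base := size * size + 1
  let groups : List (List Int) :=
    (starts.zip lens).map (fun sL => (PySem.List.pyRange 0 sL.2 1).map (fun j => base + (sL.1 + j) * size))
  (groups.take rows.length, groups.drop rows.length)   -- groups[:len(rows)], groups[len(rows):] (nonneg bounds)

-- ===== PRECONDITION & SPEC =====
def Spec_pattern_id (size : Int) (rows : List (List Int)) (cols : List (List Int)) (out : List (List Int) × List (List Int)) : Prop := out = pattern_id_alt size rows cols
instance (size : Int) (rows : List (List Int)) (cols : List (List Int)) (out : List (List Int) × List (List Int)) : Decidable (Spec_pattern_id size rows cols out) := by unfold Spec_pattern_id; infer_instance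

-- ===== CLAIM (what is proved, stated in full; the proofs are below) =====
def Claim_equal_pattern_id : Prop := ∀ (size : Int) (rows : List (List Int)) (cols : List (List Int)), Dom_pattern_id size rows cols → Spec_pattern_id size rows cols (pattern_id size rows cols)


-- ===== LEMMAS AND PROOFS =====

-- prefix-sum starting offsets: [s, s+L0, s+L0+L1, ...]
def specStarts : List Int → Int → List Int
  | [], _ => []
  | L :: ls, s => s :: specStarts ls (s + L)

theorem length_specStarts (ls : List Int) (s : Int) : (specStarts ls s).length = ls.length := by
  induction ls generalizing s with
  | nil => simp [specStarts]
  | cons L ls ih => simp [specStarts, ih]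

theorem specStarts_append (a b : List Int) (s : Int) :
    specStarts (a ++ b) s = specStarts a s ++ specStarts b (s + a.sum) := by
  induction a generalizing s with
  | nil => simp [specStarts]
  | cons L ls ih => simp [specStarts, ih]; ring_nf

theorem startsFold (lens acc : List Int) (s : Int) :
    lens.foldl (fun (p : List Int × Int) L => (p.1 ++ [p.2], p.2 + L)) (acc, s)
      = (acc ++ specStarts lens s, s + lens.sum) := by
  induction lens generalizing acc s with
  | nil => simp [specStarts]
  | cons L ls ih => simp [specStarts, ih]; ring_nf

theorem groupFold (size : Int) (row : List Int) (acc : List Int) (c : Int) :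
    row.foldl (fun (q : List Int × Int) _pat => (q.1 ++ [q.2], q.2 + size)) (acc, c)
      = (acc ++ (List.range row.length).map (fun (j : Nat) => c + (j : Int) * size),
         c + (row.length : Int) * size) := by
  induction row generalizing acc c with
  | nil => simp
  | cons x xs ih =>
    simp only [List.foldl_cons, ih, List.length_cons, Prod.mk.injEq]
    refine ⟨?_, by push_cast; ring⟩
    rw [List.range_succ_eq_map]
    simp only [List.map_cons, List.map_map, List.append_assoc, List.singleton_append,
      Nat.cast_zero, zero_mul, add_zero]
    congr 2
    apply List.map_congr_left; intro j _; simp [Function.comp]; ring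

-- B's closed-form group equals A's inner-loop output
theorem bgroup_eq (size base st : Int) (n : Nat) :
    (PySem.List.pyRange 0 (n : Int) 1).map (fun j => base + (st + j) * size)
      = (List.range n).map (fun (j : Nat) => (base + st * size) + (j : Int) * size) := by
  rw [PySem.List.pyRange_one]
  have h : ((n : Int) - 0).toNat = n := by omega
  rw [h, List.map_map]
  apply List.map_congr_left; intro j _; simp [Function.comp]; ring

theorem outerFold (size base : Int) (gs : List (List Int)) (acc : List (List Int)) (st : Int) :
    pvAGroups size gs acc (base + st * size)
      = (acc ++ ((specStarts (gs.map (fun g => (g.length : Int))) st).zip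
                  (gs.map (fun g => (g.length : Int)))).map
            (fun sL => (PySem.List.pyRange 0 sL.2 1).map (fun j => base + (sL.1 + j) * size)),
         base + (st + (gs.map (fun g => (g.length : Int))).sum) * size) := by
  induction gs generalizing acc st with
  | nil => simp [pvAGroups, specStarts]
  | cons g gs ih =>
    have hg : pvAGroup size g (base + st * size)
        = ((List.range g.length).map (fun (j : Nat) => (base + st * size) + (j : Int) * size),
           base + (st + (g.length : Int)) * size) := by
      unfold pvAGroup
      rw [groupFold]
      refine Prod.ext rfl ?_
      simp; ring
    have hstep : pvAGroups size (g :: gs) acc (base + st * size)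
        = pvAGroups size gs
            (acc ++ [(List.range g.length).map (fun (j : Nat) => (base + st * size) + (j : Int) * size)])
            (base + (st + (g.length : Int)) * size) := by
      simp only [pvAGroups, List.foldl_cons, hg]
    rw [hstep, ih]
    simp only [List.map_cons, specStarts, List.zip_cons_cons, List.sum_cons, Prod.mk.injEq]
    refine ⟨?_, by ring⟩
    rw [bgroup_eq]
    simp

-- ===== VERDICT (by name: the statement is the Claim_ definition above) =====
theorem pattern_id_spec : Claim_equal_pattern_id := by
  intro size rows cols _hdom
  unfold Spec_pattern_id pattern_id pattern_id_alt
  dsimp only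
  have hA := outerFold size (size * size + 1) rows [] 0
  have hC := outerFold size (size * size + 1) cols []
      ((rows.map (fun g => (g.length : Int))).sum)
  simp only [zero_mul, add_zero, zero_add, List.nil_append] at hA hC
  rw [hA, hC, startsFold]
  simp only [List.nil_append]
  rw [specStarts_append]
  have hlr : (specStarts (rows.map (fun g => (g.length : Int))) 0).length
      = (rows.map (fun g => (g.length : Int))).length := length_specStarts _ _
  rw [List.zip_append (by rw [hlr])]
  rw [List.map_append]
  have hlen : ((specStarts (rows.map (fun g => (g.length : Int))) 0).zip
        (rows.map (fun g => (g.length : Int)))).length = rows.length := by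
    simp [List.length_zip, hlr]
  refine Prod.ext ?_ ?_
  · show _ = List.take rows.length _
    rw [List.take_append_of_le_length (by simp [hlen]),
        List.take_of_length_le (by simp [hlen])]
  · show _ = List.drop rows.length _
    rw [List.drop_append_of_le_length (by simp [hlen]),
        List.drop_of_length_le (by simp [hlen])]
    simp
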